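-- pv_equiv track=rewrite | github.com/suman2120/HIT137-Assignment2 | ques2/q2_temperature_analysis.py | build_month_columns
-- ===== SOURCE A (Python) =====
-- MONTHS = [
--     "january","february","march","april","may","june",
--     "july","august","september","october","november","december"
-- ]
--
-- def build_month_columns(idx_map):
--     cols = []
--     i = 0
--     while i < 12:
--         mon = MONTHS[i]
--         if mon in idx_map:
--             cols.append((i + 1, idx_map[mon]))
--         i = i + 1
--     return cols
-- ===== SOURCE B (Python) =====
-- MONTHS = [
--     "january","february","march","april","may","june",
--     "july","august","september","october","november","december"
-- ]
--
-- def build_month_columns(idx_map):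
--     lookup = {m: i for i, m in enumerate(MONTHS)}
--     cols = [(lookup[mon] + 1, val) for mon, val in idx_map.items() if mon in lookup]
--     cols.sort(key=lambda c: c[0])
--     return cols
-- ===== Notes on version B (the rewrite author's own statement) =====
-- stated objective: alternative
-- what changed: Instead of scanning the fixed 12-month list and probing the dict for each month, B builds a month-name-to-index lookup once, makes a single pass over idx_map's items collecting (index+1, value) for month keys, and sorts by the first component to restore calendar order.
import Mathlib
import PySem

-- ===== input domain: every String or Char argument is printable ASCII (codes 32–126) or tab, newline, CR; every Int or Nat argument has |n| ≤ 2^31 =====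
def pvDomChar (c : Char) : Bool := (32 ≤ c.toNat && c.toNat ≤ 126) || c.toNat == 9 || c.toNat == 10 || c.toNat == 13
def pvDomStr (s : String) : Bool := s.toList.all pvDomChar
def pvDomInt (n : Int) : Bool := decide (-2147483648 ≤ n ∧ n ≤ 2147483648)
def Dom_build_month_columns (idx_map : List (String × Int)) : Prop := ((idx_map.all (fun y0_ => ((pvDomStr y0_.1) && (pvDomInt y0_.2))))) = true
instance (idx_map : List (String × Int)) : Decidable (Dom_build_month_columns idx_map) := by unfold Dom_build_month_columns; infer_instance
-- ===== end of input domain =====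

-- B replaces A's scan of the fixed 12-month list (with a dict probe per month) by one pass
-- over idx_map's items through a month->index lookup, followed by a sort on the month index
-- (objective: alternative decomposition, same result).


-- ===== PORT A =====
def pvMONTHS : List String := [
  "january","february","march","april","may","june",
  "july","august","september","october","november","december"]

def build_month_columns (idx_map : List (String × Int)) : List (Int × Int) :=
  let d := PySem.Dict.mk idx_map
  -- 'while i < 12' over i = 0..11; MONTHS[i] is always in range, so pyGetD with a dummy default is exact
  (PySem.List.pyRange 0 12 1).foldl
    (fun cols i =>
      let mon := PySem.List.pyGetD pvMONTHS i ""
      if d.contains mon then cols ++ [(i + 1, d.getD mon 0)] else cols)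
    []

-- ===== PORT B =====
-- {m: i for i, m in enumerate(MONTHS)} — a comprehension over the module constant, ported as the literal dict it builds
def pvMonthLookup : PySem.Dict String Int := PySem.Dict.mk [
  ("january", 0), ("february", 1), ("march", 2), ("april", 3), ("may", 4), ("june", 5),
  ("july", 6), ("august", 7), ("september", 8), ("october", 9), ("november", 10), ("december", 11)]

def build_month_columns_alt (idx_map : List (String × Int)) : List (Int × Int) :=
  -- 'if mon in lookup' + 'lookup[mon]' combined as one get? (exact: lookup[mon] succeeds iff mon in lookup)
  let cols := idx_map.filterMap (fun p =>
    match pvMonthLookup.get? p.1 with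
    | some j => some (j + 1, p.2)
    | none => none)
  PySem.List.sorted cols (fun c => c.1) false

-- ===== PRECONDITION & SPEC =====
-- Pre_ excludes association lists with duplicate keys: A's idx_map argument is a Python dict, which
-- cannot carry duplicate keys, so no Python-representable input is excluded.
def Pre_build_month_columns (idx_map : List (String × Int)) : Prop :=
  (idx_map.map Prod.fst).Nodup
instance (idx_map : List (String × Int)) : Decidable (Pre_build_month_columns idx_map) := by
  unfold Pre_build_month_columns; infer_instance

def pvWitness_build_month_columns : (List (String × Int)) := [("march", 5), ("january", 2), ("zzz", 9)]

def Spec_build_month_columns (idx_map : List (String × Int)) (out : List (Int × Int)) : Prop := out = build_month_columns_alt idx_map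
instance (idx_map : List (String × Int)) (out : List (Int × Int)) : Decidable (Spec_build_month_columns idx_map out) := by unfold Spec_build_month_columns; infer_instance

-- ===== CLAIM (what is proved, stated in full; the proofs are below) =====
def Claim_equal_build_month_columns : Prop := ∀ (idx_map : List (String × Int)), Dom_build_month_columns idx_map → Pre_build_month_columns idx_map → Spec_build_month_columns idx_map (build_month_columns idx_map)

-- ===== LEMMAS AND PROOFS =====

-- the items list of the literal lookup dict, for membership reasoning
def pvMonthPairs : List (String × Int) := [
  ("january", 0), ("february", 1), ("march", 2), ("april", 3), ("may", 4), ("june", 5),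
  ("july", 6), ("august", 7), ("september", 8), ("october", 9), ("november", 10), ("december", 11)]

lemma lookup_get?_iff (k : String) (j : Int) :
    pvMonthLookup.get? k = some j ↔ (k, j) ∈ pvMonthPairs :=
  PySem.Dict.get?_eq_some_iff_mem_items pvMonthLookup k j (by decide)

lemma monthPairs_inj (k k' : String) (j : Int) (h : (k, j) ∈ pvMonthPairs)
    (h' : (k', j) ∈ pvMonthPairs) : k = k' := by
  simp only [pvMonthPairs, List.mem_cons, List.not_mem_nil, or_false, Prod.mk.injEq] at h h'
  rcases h with ⟨rfl,rfl⟩|⟨rfl,rfl⟩|⟨rfl,rfl⟩|⟨rfl,rfl⟩|⟨rfl,rfl⟩|⟨rfl,rfl⟩|⟨rfl,rfl⟩|⟨rfl,rfl⟩|⟨rfl,rfl⟩|⟨rfl,rfl⟩|⟨rfl,rfl⟩|⟨rfl,rfl⟩ <;>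
    rcases h' with ⟨rfl,h'⟩|⟨rfl,h'⟩|⟨rfl,h'⟩|⟨rfl,h'⟩|⟨rfl,h'⟩|⟨rfl,h'⟩|⟨rfl,h'⟩|⟨rfl,h'⟩|⟨rfl,h'⟩|⟨rfl,h'⟩|⟨rfl,h'⟩|⟨rfl,h'⟩ <;>
    simp_all



lemma A_eq_filter_map (idx_map : List (String × Int)) :
    build_month_columns idx_map =
      (([0,1,2,3,4,5,6,7,8,9,10,11] : List Int).filter
          (fun i => (PySem.Dict.mk idx_map).contains (PySem.List.pyGetD pvMONTHS i ""))).map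
        (fun i => (i + 1, (PySem.Dict.mk idx_map).getD (PySem.List.pyGetD pvMONTHS i "") 0)) := by
  unfold build_month_columns
  rw [show PySem.List.pyRange 0 12 1 = ([0,1,2,3,4,5,6,7,8,9,10,11] : List Int) from by decide]
  rw [PySem.List.foldl_append_if
        (fun i => (PySem.Dict.mk idx_map).contains (PySem.List.pyGetD pvMONTHS i ""))
        (fun i => (i + 1, (PySem.Dict.mk idx_map).getD (PySem.List.pyGetD pvMONTHS i "") 0))]
  simp

theorem AB_agree (idx_map : List (String × Int)) (hpre : (idx_map.map Prod.fst).Nodup) :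
    build_month_columns idx_map = build_month_columns_alt idx_map := by
  have hd : (PySem.Dict.mk idx_map).keys.Nodup := by
    simpa [PySem.Dict.keys] using hpre
  rw [A_eq_filter_map]
  unfold build_month_columns_alt
  have hpair : ((([0,1,2,3,4,5,6,7,8,9,10,11] : List Int).filter
          (fun i => (PySem.Dict.mk idx_map).contains (PySem.List.pyGetD pvMONTHS i ""))).map
        (fun i => ((i + 1 : Int), (PySem.Dict.mk idx_map).getD (PySem.List.pyGetD pvMONTHS i "") 0))).Pairwise
        (fun a b => a.1 < b.1) := by
    apply List.pairwise_map.mpr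
    have h12 : (([0,1,2,3,4,5,6,7,8,9,10,11] : List Int)).Pairwise (· < ·) := by decide
    exact (h12.filter _).imp (fun h => by simpa using by omega)
  have hnodupA : ((([0,1,2,3,4,5,6,7,8,9,10,11] : List Int).filter
          (fun i => (PySem.Dict.mk idx_map).contains (PySem.List.pyGetD pvMONTHS i ""))).map
        (fun i => ((i + 1 : Int), (PySem.Dict.mk idx_map).getD (PySem.List.pyGetD pvMONTHS i "") 0))).Nodup :=
    hpair.imp (fun h heq => by subst heq; exact lt_irrefl _ h)
  have hnodupB : (idx_map.filterMap (fun p =>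
      match pvMonthLookup.get? p.1 with
      | some j => some ((j + 1 : Int), p.2)
      | none => none)).Nodup := by
    apply List.pairwise_filterMap.mpr
    refine (List.pairwise_map.mp hpre).imp ?_
    intro p q hne b hb b' hb'
    cases hj : pvMonthLookup.get? p.1 with
    | none => simp [hj] at hb
    | some j =>
      cases hj' : pvMonthLookup.get? q.1 with
      | none => simp [hj'] at hb'
      | some j' =>
        simp [hj] at hb; simp [hj'] at hb'
        intro heq
        apply hne
        have : j = j' := by
          have := hb ▸ hb' ▸ heq
          simp at this; omega
        exact monthPairs_inj p.1 q.1 j ((lookup_get?_iff _ _).mp hj)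
          ((lookup_get?_iff _ _).mp (this ▸ hj'))
  have hmem : ∀ a, (a ∈ (([0,1,2,3,4,5,6,7,8,9,10,11] : List Int).filter
          (fun i => (PySem.Dict.mk idx_map).contains (PySem.List.pyGetD pvMONTHS i ""))).map
        (fun i => ((i + 1 : Int), (PySem.Dict.mk idx_map).getD (PySem.List.pyGetD pvMONTHS i "") 0))) ↔
      a ∈ idx_map.filterMap (fun p =>
        match pvMonthLookup.get? p.1 with
        | some j => some ((j + 1 : Int), p.2)
        | none => none) := by
    intro a
    simp only [List.mem_map, List.mem_filter, List.mem_filterMap]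
    constructor
    · rintro ⟨i, ⟨hi, hp⟩, rfl⟩
      rw [PySem.Dict.contains_eq_isSome_get?, Option.isSome_iff_exists] at hp
      obtain ⟨v, hv⟩ := hp
      refine ⟨(PySem.List.pyGetD pvMONTHS i "", v), PySem.Dict.mem_items_of_get?_eq_some _ hv, ?_⟩
      have hlk : pvMonthLookup.get? (PySem.List.pyGetD pvMONTHS i "") = some i := by
        simp only [List.mem_cons] at hi
        rcases hi with rfl|rfl|rfl|rfl|rfl|rfl|rfl|rfl|rfl|rfl|rfl|rfl|hi
        all_goals first | decide | simp at hi
      simp [hlk, PySem.Dict.getD_of_get?_eq_some _ 0 hv]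
    · rintro ⟨⟨k, v⟩, hkv, hg⟩
      cases hj : pvMonthLookup.get? k with
      | none => simp [hj] at hg
      | some j =>
        simp [hj] at hg
        have hkj := (lookup_get?_iff _ _).mp hj
        have hget : (PySem.Dict.mk idx_map).get? k = some v :=
          PySem.Dict.get?_of_mem_items _ hkv hd
        refine ⟨j, ⟨?_, ?_⟩, ?_⟩
        · simp only [pvMonthPairs, List.mem_cons, List.not_mem_nil, or_false, Prod.mk.injEq] at hkj
          rcases hkj with ⟨rfl,rfl⟩|⟨rfl,rfl⟩|⟨rfl,rfl⟩|⟨rfl,rfl⟩|⟨rfl,rfl⟩|⟨rfl,rfl⟩|⟨rfl,rfl⟩|⟨rfl,rfl⟩|⟨rfl,rfl⟩|⟨rfl,rfl⟩|⟨rfl,rfl⟩|⟨rfl,rfl⟩ <;> simp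
        · have hmon : PySem.List.pyGetD pvMONTHS j "" = k := by
            simp only [pvMonthPairs, List.mem_cons, List.not_mem_nil, or_false, Prod.mk.injEq] at hkj
            rcases hkj with ⟨rfl,rfl⟩|⟨rfl,rfl⟩|⟨rfl,rfl⟩|⟨rfl,rfl⟩|⟨rfl,rfl⟩|⟨rfl,rfl⟩|⟨rfl,rfl⟩|⟨rfl,rfl⟩|⟨rfl,rfl⟩|⟨rfl,rfl⟩|⟨rfl,rfl⟩|⟨rfl,rfl⟩ <;> rfl
          rw [hmon, PySem.Dict.contains_eq_isSome_get?, hget]; rfl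
        · have hmon : PySem.List.pyGetD pvMONTHS j "" = k := by
            simp only [pvMonthPairs, List.mem_cons, List.not_mem_nil, or_false, Prod.mk.injEq] at hkj
            rcases hkj with ⟨rfl,rfl⟩|⟨rfl,rfl⟩|⟨rfl,rfl⟩|⟨rfl,rfl⟩|⟨rfl,rfl⟩|⟨rfl,rfl⟩|⟨rfl,rfl⟩|⟨rfl,rfl⟩|⟨rfl,rfl⟩|⟨rfl,rfl⟩|⟨rfl,rfl⟩|⟨rfl,rfl⟩ <;> rfl
          rw [hmon, PySem.Dict.getD_of_get?_eq_some _ 0 hget, ← hg]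
  exact (PySem.List.sorted_eq_of_perm_of_pairwise_lt _ _ (fun c => c.1)
    ((List.perm_ext_iff_of_nodup hnodupA hnodupB).mpr hmem) hpair).symm

-- ===== VERDICT (by name: the statement is the Claim_ definition above) =====
theorem build_month_columns_spec : Claim_equal_build_month_columns := by
  intro idx_map _ hpre
  unfold Spec_build_month_columns
  exact AB_agree idx_map hpre
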